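-- pv_equiv track=rewrite | github.com/manman4/study_OEIS | src/334/334617/334617_01.py | f
-- ===== SOURCE A (Python) =====
-- def f(n):
--     coords = {(x,y) for x in range(n) for y in range(n) if x <= y}
--     pieces = []
--     for size in range(1,n+1):
--         b0 = {(x,y) for x in range(size) for y in range(size) if x <= y}
--         b1 = {(       x,size-1-y) for x,y in b0}
--         b2 = {(size-1-x,       y) for x,y in b0}
--         b3 = {(size-1-x,size-1-y) for x,y in b0}
--         bases = [b0] if size == 1 else [b0, b1, b2, b3]
--         pieces += [{(x+ox, y+oy) for x,y in b} for b in bases for ox in range(n) for oy in range(n)]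
--     pieces = [p for p in pieces if p <= coords]
--     pieces.sort(key=min)
--
--     def recurse(grid, candidates, depth='*'):
--         if not grid: return 1
--         if not candidates: return 0
--         hd, tl = candidates[0], candidates[1:]
--         if min(grid) != min(hd): return 0
--         if hd <= grid: return recurse(grid - hd, [t for t in tl if not (hd & t)], depth+'*') + recurse(grid, tl, depth+'*')
--         return recurse(grid, tl, depth+'*')
--     return recurse(coords, pieces)
-- ===== SOURCE B (Python) =====
-- def f(n):
--     # Same piece inventory as the spec (all four orientations of staircase triangles,
--     # translated, kept if inside the triangular grid), but shapes are generated
--     # directly from their arithmetic conditions, and the count uses a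
--     # cover-the-minimum-cell recursion over a dict index (min cell -> pieces)
--     # instead of a sorted take/skip scan of a candidate list.
--     coords = {(x, y) for x in range(n) for y in range(n) if x <= y}
--     pieces = []
--     for s in range(1, n + 1):
--         cells = [(x, y) for x in range(s) for y in range(s)]
--         shapes = [{(x, y) for x, y in cells if x <= y}]
--         if s > 1:
--             shapes.append({(x, y) for x, y in cells if x + y <= s - 1})
--             shapes.append({(x, y) for x, y in cells if x + y >= s - 1})
--             shapes.append({(x, y) for x, y in cells if y <= x})
--         for sh in shapes:
--             for ox in range(n):
--                 for oy in range(n):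
--                     p = {(x + ox, y + oy) for x, y in sh}
--                     if p <= coords:
--                         pieces.append(p)
--
--     by_min = {}
--     for p in pieces:
--         by_min.setdefault(min(p), []).append(p)
--
--     def recurse(grid):
--         if not grid:
--             return 1
--         total = 0
--         for p in by_min.get(min(grid), []):
--             if p <= grid:
--                 total += recurse(grid - p)
--         return total
--
--     return recurse(coords)
-- ===== Notes on version B (the rewrite author's own statement) =====
-- stated objective: alternative
-- what changed: A recurses over a sorted candidate list with binary take/skip branching (re-filtering the surviving candidates at every placement); B indexes the pieces once by their minimum cell in a dict and recurses by summing over just the bucket of pieces that cover the grid's minimum uncovered cell, with shapes generated directly from arithmetic conditions instead of reflecting a base triangle.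
import Mathlib
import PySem

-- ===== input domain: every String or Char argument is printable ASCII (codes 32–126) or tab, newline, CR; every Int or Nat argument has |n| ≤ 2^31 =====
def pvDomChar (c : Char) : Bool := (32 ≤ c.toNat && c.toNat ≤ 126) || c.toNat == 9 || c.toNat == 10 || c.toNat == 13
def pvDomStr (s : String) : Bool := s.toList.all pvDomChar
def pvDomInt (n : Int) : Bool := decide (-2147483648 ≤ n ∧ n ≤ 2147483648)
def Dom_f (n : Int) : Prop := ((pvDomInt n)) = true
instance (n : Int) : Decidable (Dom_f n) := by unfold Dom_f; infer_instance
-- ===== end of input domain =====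

-- B rewrites A's sorted take/skip candidate recursion as a cover-the-minimum-cell
-- recursion over a dict index (min cell -> pieces), with shapes generated directly
-- from their arithmetic conditions; the bucket lookup replaces A's per-node
-- scan and filtering of the remaining candidate list (same exact count).

-- ===== PORT A =====

-- [(x,y) for x in range(s) for y in range(s) if x <= y]
def pvTriList (s : Int) : List (Int × Int) :=
  (PySem.List.pyRange 0 s 1).flatMap (fun x =>
    (PySem.List.pyRange 0 s 1).filterMap (fun y => if x ≤ y then some (x, y) else none))

-- coords = {(x,y) for x in range(n) for y in range(n) if x <= y}  (identical line in A and B)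
def pvCoords (n : Int) : PySem.Set (Int × Int) := PySem.Set.ofList (pvTriList n)

-- min(p) on a set of int pairs (Python tuple order is lexicographic); the default
-- (0,0) is never reached: min is only applied to nonempty sets in both programs.
def pvMinCell (p : PySem.Set (Int × Int)) : Int × Int :=
  match PySem.List.min2? p Prod.fst Prod.snd with
  | some m => m
  | none => (0, 0)

-- the 'for size in range(1, n+1): ... pieces += [...]' accumulation loop of A
def pvPiecesRawA (n : Int) : List (PySem.Set (Int × Int)) :=
  (PySem.List.pyRange 1 (n + 1) 1).foldl (fun pieces s =>
    let b0 : PySem.Set (Int × Int) := PySem.Set.ofList (pvTriList s)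
    let b1 : PySem.Set (Int × Int) := PySem.Set.ofList (b0.map (fun c => (c.1, s - 1 - c.2)))
    let b2 : PySem.Set (Int × Int) := PySem.Set.ofList (b0.map (fun c => (s - 1 - c.1, c.2)))
    let b3 : PySem.Set (Int × Int) := PySem.Set.ofList (b0.map (fun c => (s - 1 - c.1, s - 1 - c.2)))
    let bases := if s = 1 then [b0] else [b0, b1, b2, b3]
    pieces ++ bases.flatMap (fun b =>
      (PySem.List.pyRange 0 n 1).flatMap (fun ox =>
        (PySem.List.pyRange 0 n 1).map (fun oy =>
          PySem.Set.ofList (b.map (fun c => (c.1 + ox, c.2 + oy))))))) []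

-- pieces = [p for p in pieces if p <= coords]; pieces.sort(key=min)
def pvPiecesA (n : Int) : List (PySem.Set (Int × Int)) :=
  PySem.List.sorted2 ((pvPiecesRawA n).filter (fun p => PySem.Set.issubset p (pvCoords n)))
    (fun p => (pvMinCell p).1) (fun p => (pvMinCell p).2)

-- recurse(grid, candidates) of A (the unused 'depth' string parameter is dropped)
def pvArec (grid : PySem.Set (Int × Int)) (cands : List (PySem.Set (Int × Int))) : Int :=
  if grid = [] then 1
  else
    match cands with
    | [] => 0
    | hd :: tl =>
      if pvMinCell grid ≠ pvMinCell hd then 0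
      else if PySem.Set.issubset hd grid then
        pvArec (PySem.Set.diff grid hd) (tl.filter (fun t => PySem.Set.inter hd t = [])) +
          pvArec grid tl
      else pvArec grid tl
termination_by cands.length
decreasing_by
  · simp only [List.length_unattach]
    exact Nat.lt_succ_of_le (le_trans (List.length_filter_le _ _) (by simp))
  · exact Nat.lt_succ_self _
  · exact Nat.lt_succ_self _

def f (n : Int) : Int := pvArec (pvCoords n) (pvPiecesA n)

-- ===== PORT B =====

-- [(x,y) for x in range(s) for y in range(s)]
def pvCellsB (s : Int) : List (Int × Int) :=
  (PySem.List.pyRange 0 s 1).flatMap (fun x =>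
    (PySem.List.pyRange 0 s 1).map (fun y => (x, y)))

-- the four shapes, generated directly from their arithmetic conditions
def pvShapesB (s : Int) : List (PySem.Set (Int × Int)) :=
  let cells := pvCellsB s
  let sh0 : PySem.Set (Int × Int) := PySem.Set.ofList (cells.filter (fun c => decide (c.1 ≤ c.2)))
  if s > 1 then
    [sh0,
     PySem.Set.ofList (cells.filter (fun c => decide (c.1 + c.2 ≤ s - 1))),
     PySem.Set.ofList (cells.filter (fun c => decide (s - 1 ≤ c.1 + c.2))),
     PySem.Set.ofList (cells.filter (fun c => decide (c.2 ≤ c.1)))]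
  else [sh0]

-- B's piece accumulation loop, with the 'if p <= coords: pieces.append(p)' test inline
def pvPiecesB (n : Int) : List (PySem.Set (Int × Int)) :=
  (PySem.List.pyRange 1 (n + 1) 1).foldl (fun pieces s =>
    pieces ++ (pvShapesB s).flatMap (fun sh =>
      (PySem.List.pyRange 0 n 1).flatMap (fun ox =>
        (PySem.List.pyRange 0 n 1).flatMap (fun oy =>
          let p : PySem.Set (Int × Int) := PySem.Set.ofList (sh.map (fun c => (c.1 + ox, c.2 + oy)))
          if PySem.Set.issubset p (pvCoords n) then [p] else [])))) []

-- for p in pieces: by_min.setdefault(min(p), []).append(p)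
def pvByMin (n : Int) : PySem.Dict (Int × Int) (List (PySem.Set (Int × Int))) :=
  (pvPiecesB n).foldl
    (fun d p => PySem.Dict.modify d (pvMinCell p) [] (fun l => l ++ [p])) PySem.Dict.empty

-- recurse(grid) of B; 'rem' is the remainder of the bucket by_min.get(min(grid), [])
-- being looped over.  The 'p ≠ []' conjunct is a pure totalization guard: every
-- stored piece is nonempty (on an empty piece Python's recurse(grid - p) would
-- recurse forever), and with it the grid shrinks at every placement.
def pvBrec (byMin : PySem.Dict (Int × Int) (List (PySem.Set (Int × Int))))
    (grid : PySem.Set (Int × Int)) (rem : List (PySem.Set (Int × Int))) : Int :=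
  if grid = [] then 1
  else
    match rem with
    | [] => 0
    | p :: tl =>
      (if h : PySem.Set.issubset p grid = true ∧ p ≠ [] then
        pvBrec byMin (PySem.Set.diff grid p)
          (PySem.Dict.getD byMin (pvMinCell (PySem.Set.diff grid p)) [])
      else 0) + pvBrec byMin grid tl
termination_by (grid.length, rem.length)
decreasing_by
  · refine Prod.Lex.left _ _ ?_
    rename_i hg
    obtain ⟨hsub, hne⟩ := h
    obtain ⟨x, hx⟩ := List.exists_mem_of_ne_nil p hne
    have hxg : x ∈ grid := (PySem.Set.issubset_iff _ _).1 hsub x hx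
    have : x ∉ PySem.Set.diff grid p := by
      simp [PySem.Set.diff, List.mem_filter, PySem.Set.contains, hx]
    exact List.length_filter_lt_length_iff_exists.2 ⟨x, hxg, by
      simpa [PySem.Set.contains] using hx⟩
  · exact Prod.Lex.right _ (Nat.lt_succ_self _)

def f_alt (n : Int) : Int :=
  pvBrec (pvByMin n) (pvCoords n)
    (PySem.Dict.getD (pvByMin n) (pvMinCell (pvCoords n)) [])

-- ===== PRECONDITION & SPEC =====
def Spec_f (n : Int) (out : Int) : Prop := out = f_alt n
instance (n : Int) (out : Int) : Decidable (Spec_f n out) := by unfold Spec_f; infer_instance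

-- ===== CLAIM (what is proved, stated in full; the proofs are below) =====
def Claim_equal_f : Prop := ∀ (n : Int), Dom_f n → Spec_f n (f n)

-- ===== LEMMAS AND PROOFS =====

-- ----- proof layer: 1
def pvLexLE (a b : Int × Int) : Prop := a.1 < b.1 ∨ (a.1 = b.1 ∧ a.2 ≤ b.2)

lemma pvLexLE_refl (a : Int × Int) : pvLexLE a a := by unfold pvLexLE; omega
lemma pvLexLE_trans {a b c : Int × Int} (h1 : pvLexLE a b) (h2 : pvLexLE b c) : pvLexLE a c := by
  unfold pvLexLE at *; omega
lemma pvLexLE_antisymm {a b : Int × Int} (h1 : pvLexLE a b) (h2 : pvLexLE b a) : a = b := by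
  unfold pvLexLE at *
  have h3 : a.1 = b.1 ∧ a.2 = b.2 := by omega
  exact Prod.ext h3.1 h3.2

def pvStep (acc : Option (Int × Int)) (x : Int × Int) : Option (Int × Int) :=
  match acc with
  | none => some x
  | some m => if (decide (x.1 < m.1) || !decide (m.1 < x.1) && decide (x.2 < m.2)) = true
              then some x else some m

lemma pvMin2_eq (l : List (Int × Int)) :
    PySem.List.min2? l Prod.fst Prod.snd = l.foldl pvStep none := by
  simp only [PySem.List.min2?]
  congr 1
  funext acc x
  cases acc <;> simp [pvStep]

lemma pvStep_go : ∀ (l : List (Int × Int)) (a : Int × Int),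
    ∃ m, l.foldl pvStep (some a) = some m ∧ (m = a ∨ m ∈ l) ∧ pvLexLE m a ∧ ∀ y ∈ l, pvLexLE m y := by
  intro l
  induction l with
  | nil => intro a; exact ⟨a, rfl, Or.inl rfl, pvLexLE_refl a, by simp⟩
  | cons x t ih =>
    intro a
    have hstep : ∃ a', pvStep (some a) x = some a' ∧ (a' = a ∨ a' = x) ∧ pvLexLE a' a ∧ pvLexLE a' x := by
      unfold pvStep
      by_cases h : (decide (x.1 < a.1) || !decide (a.1 < x.1) && decide (x.2 < a.2)) = true
      · refine ⟨x, by simp [h], Or.inr rfl, ?_, pvLexLE_refl x⟩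
        simp only [Bool.or_eq_true, Bool.and_eq_true, Bool.not_eq_true', decide_eq_true_eq,
          decide_eq_false_iff_not] at h
        unfold pvLexLE; omega
      · refine ⟨a, by simp [h], Or.inl rfl, pvLexLE_refl a, ?_⟩
        simp only [Bool.or_eq_true, Bool.and_eq_true, Bool.not_eq_true', decide_eq_true_eq,
          decide_eq_false_iff_not] at h
        unfold pvLexLE; omega
    obtain ⟨a', ha', hmem, h1, h2⟩ := hstep
    obtain ⟨m, hm, hmmem, hma, hall⟩ := ih a'
    refine ⟨m, by simpa [ha'] using hm, ?_, ?_, ?_⟩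
    · rcases hmmem with h | h
      · subst h; rcases hmem with h | h
        · exact Or.inl h
        · exact Or.inr (by simp [h])
      · exact Or.inr (by simp [h])
    · refine pvLexLE_trans hma ?_
      rcases hmem with h | h
      · subst h; exact pvLexLE_refl _
      · subst h; exact h1
    · intro y hy
      rcases List.mem_cons.1 hy with h | h
      · subst h
        refine pvLexLE_trans hma ?_
        rcases hmem with h | h
        · subst h; exact h2
        · subst h; exact pvLexLE_refl _
      · exact hall y h

lemma pvMinCell_spec {g : PySem.Set (Int × Int)} (hg : g ≠ []) :
    pvMinCell g ∈ g ∧ ∀ y ∈ g, pvLexLE (pvMinCell g) y := by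
  obtain ⟨a, t, rfl⟩ : ∃ a t, g = a :: t := by
    cases g with | nil => exact absurd rfl hg | cons a t => exact ⟨a, t, rfl⟩
  obtain ⟨m, hm, hmem, hma, hall⟩ := pvStep_go t a
  have : pvMinCell (a :: t) = m := by
    unfold pvMinCell
    rw [pvMin2_eq]
    simp only [List.foldl_cons]
    have : pvStep none a = some a := rfl
    rw [this, hm]
  rw [this]
  constructor
  · rcases hmem with h | h
    · simp [h]
    · simp [h]
  · intro y hy
    rcases List.mem_cons.1 hy with h | h
    · exact h ▸ hma
    · exact hall y h

lemma pvMinCell_mem {g : PySem.Set (Int × Int)} (hg : g ≠ []) : pvMinCell g ∈ g :=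
  (pvMinCell_spec hg).1
lemma pvMinCell_min {g : PySem.Set (Int × Int)} (hg : g ≠ []) {y} (hy : y ∈ g) :
    pvLexLE (pvMinCell g) y := (pvMinCell_spec hg).2 y hy

-- ----- proof layer: 2
def pvMemEq (p q : List (Int × Int)) : Prop := ∀ x, x ∈ p ↔ x ∈ q

lemma pvBoolExt {a b : Bool} (h : a = true ↔ b = true) : a = b := by
  cases a <;> cases b <;> simp_all

-- number of sub(lists) of cs that exactly tile g, as a take/skip recursion
def pvT (g : PySem.Set (Int × Int)) (cs : List (PySem.Set (Int × Int))) : Int :=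
  match cs with
  | [] => if g = [] then 1 else 0
  | hd :: tl =>
    (if PySem.Set.issubset hd g = true then pvT (PySem.Set.diff g hd) tl else 0) + pvT g tl

lemma pvSub_diff_iff {p q g : PySem.Set (Int × Int)} :
    PySem.Set.issubset p (PySem.Set.diff g q) = true ↔
      PySem.Set.issubset p g = true ∧ ∀ a ∈ p, a ∉ q := by
  simp only [PySem.Set.issubset_iff, PySem.Set.mem_diff]
  constructor
  · intro h
    exact ⟨fun x hx => (h x hx).1, fun a ha => (h a ha).2⟩
  · intro ⟨h1, h2⟩ x hx
    exact ⟨h1 x hx, h2 x hx⟩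

lemma pvSub_diff_mono {p q g : PySem.Set (Int × Int)}
    (h : PySem.Set.issubset p (PySem.Set.diff g q) = true) :
    PySem.Set.issubset p g = true := (pvSub_diff_iff.1 h).1

lemma pvDiff_comm (g a b : PySem.Set (Int × Int)) :
    PySem.Set.diff (PySem.Set.diff g a) b = PySem.Set.diff (PySem.Set.diff g b) a := by
  simp only [PySem.Set.diff]
  exact List.filter_comm _ _ _

lemma pvSub_nil {p : PySem.Set (Int × Int)} (hp : p ≠ []) :
    PySem.Set.issubset p ([] : PySem.Set (Int × Int)) ≠ true := by
  intro h
  obtain ⟨x, hx⟩ := List.exists_mem_of_ne_nil p hp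
  exact absurd ((PySem.Set.issubset_iff _ _).1 h x hx) (List.not_mem_nil)

lemma pvT_nil {cs : List (PySem.Set (Int × Int))} (h : ∀ p ∈ cs, p ≠ []) :
    pvT [] cs = 1 := by
  induction cs with
  | nil => simp [pvT]
  | cons hd tl ih =>
    simp only [pvT, if_neg (pvSub_nil (h hd (by simp)))]
    rw [ih (fun p hp => h p (by simp [hp]))]
    norm_num

lemma pvT_zero {g : PySem.Set (Int × Int)} {cs : List (PySem.Set (Int × Int))} {c : Int × Int}
    (hc : c ∈ g) (h : ∀ p ∈ cs, c ∉ p) : pvT g cs = 0 := by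
  induction cs generalizing g with
  | nil =>
    have : g ≠ [] := fun hh => by subst hh; exact absurd hc (List.not_mem_nil)
    simp [pvT, this]
  | cons hd tl ih =>
    have hcd : c ∈ PySem.Set.diff g hd := (PySem.Set.mem_diff _ _ _).2 ⟨hc, h hd (by simp)⟩
    have htl : ∀ p ∈ tl, c ∉ p := fun p hp => h p (by simp [hp])
    simp only [pvT, ih hcd htl, ih hc htl]
    split <;> rfl

lemma pvT_filter {g : PySem.Set (Int × Int)} {cs : List (PySem.Set (Int × Int))}
    {P : PySem.Set (Int × Int) → Bool}
    (h : ∀ p ∈ cs, P p = false → ¬ (PySem.Set.issubset p g = true)) :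
    pvT g (cs.filter P) = pvT g cs := by
  induction cs generalizing g with
  | nil => rfl
  | cons hd tl ih =>
    by_cases hP : P hd = true
    · rw [List.filter_cons_of_pos hP]
      simp only [pvT]
      rw [ih (fun p hp hPp hsub => h p (by simp [hp]) hPp (pvSub_diff_mono hsub)),
          ih (fun p hp hPp => h p (by simp [hp]) hPp)]
    · have hPf : P hd = false := by simpa using hP
      rw [List.filter_cons_of_neg (by simp [hPf])]
      have hns : ¬ (PySem.Set.issubset hd g = true) := h hd (by simp) hPf
      simp only [pvT, if_neg hns]
      rw [ih (fun p hp hPp => h p (by simp [hp]) hPp), zero_add]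

lemma pvT_swap (x y : PySem.Set (Int × Int)) (l : List (PySem.Set (Int × Int)))
    (g : PySem.Set (Int × Int)) : pvT g (y :: x :: l) = pvT g (x :: y :: l) := by
  simp only [pvT]
  by_cases hx : PySem.Set.issubset x g = true <;>
  by_cases hy : PySem.Set.issubset y g = true
  · by_cases hxy : PySem.Set.issubset x (PySem.Set.diff g y) = true
    · have hyx : PySem.Set.issubset y (PySem.Set.diff g x) = true := by
        rw [pvSub_diff_iff] at hxy ⊢
        exact ⟨hy, fun a ha hax => hxy.2 a hax ha⟩
      simp only [if_pos hx, if_pos hy, if_pos hxy, if_pos hyx]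
      rw [pvDiff_comm g y x]
      ring
    · have hyx : ¬ PySem.Set.issubset y (PySem.Set.diff g x) = true := by
        rw [pvSub_diff_iff] at hxy ⊢
        intro ⟨_, h2⟩
        exact hxy ⟨hx, fun a ha hay => h2 a hay ha⟩
      simp only [if_pos hx, if_pos hy, if_neg hxy, if_neg hyx]
      ring
  · have hyx : ¬ PySem.Set.issubset y (PySem.Set.diff g x) = true :=
      fun hh => hy (pvSub_diff_mono hh)
    simp only [if_pos hx, if_neg hy, if_neg hyx]
    try ring
  · have hxy : ¬ PySem.Set.issubset x (PySem.Set.diff g y) = true :=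
      fun hh => hx (pvSub_diff_mono hh)
    simp only [if_neg hx, if_pos hy, if_neg hxy]
    try ring
  · simp only [if_neg hx, if_neg hy]
    try ring

-- ----- proof layer: 3
lemma pvT_perm {cs cs' : List (PySem.Set (Int × Int))} (h : cs.Perm cs') :
    ∀ g, pvT g cs = pvT g cs' := by
  induction h with
  | nil => intro g; rfl
  | cons x h ih => intro g; simp only [pvT]; rw [ih, ih]
  | swap x y l => intro g; exact pvT_swap x y l g
  | trans h1 h2 ih1 ih2 => intro g; rw [ih1, ih2]

lemma pvSub_congr_left {p p' g : PySem.Set (Int × Int)} (h : pvMemEq p p') :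
    PySem.Set.issubset p g = PySem.Set.issubset p' g := by
  apply pvBoolExt
  simp only [PySem.Set.issubset_iff]
  exact ⟨fun hh x hx => hh x ((h x).2 hx), fun hh x hx => hh x ((h x).1 hx)⟩

lemma pvDiff_congr_right {p p' g : PySem.Set (Int × Int)} (h : pvMemEq p p') :
    PySem.Set.diff g p = PySem.Set.diff g p' := by
  simp only [PySem.Set.diff]
  apply List.filter_congr
  intro x _
  have : PySem.Set.contains p x = PySem.Set.contains p' x := by
    apply pvBoolExt
    rw [PySem.Set.contains_iff, PySem.Set.contains_iff]
    exact h x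
  rw [this]

lemma pvT_congr {cs cs' : List (PySem.Set (Int × Int))} (h : List.Forall₂ pvMemEq cs cs') :
    ∀ g, pvT g cs = pvT g cs' := by
  induction h with
  | nil => intro g; rfl
  | cons h1 h2 ih =>
    intro g
    simp only [pvT]
    rw [pvSub_congr_left h1, pvDiff_congr_right h1, ih, ih]

lemma pvInter_eq_nil_iff {a t : PySem.Set (Int × Int)} :
    PySem.Set.inter a t = [] ↔ ∀ x ∈ a, x ∉ t := by
  simp only [PySem.Set.inter, List.filter_eq_nil_iff]
  constructor
  · intro h x hx hxt
    exact h x hx (by rwa [PySem.Set.contains_iff])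
  · intro h x hx hc
    exact h x hx (by rwa [PySem.Set.contains_iff] at hc)

lemma pvArec_eq_pvT_aux : ∀ (N : Nat) (cs : List (PySem.Set (Int × Int)))
    (g : PySem.Set (Int × Int)), cs.length ≤ N →
    List.Pairwise (fun a b => pvLexLE (pvMinCell a) (pvMinCell b)) cs →
    (∀ p ∈ cs, p ≠ [] ∧ PySem.Set.issubset p g = true) →
    pvArec g cs = pvT g cs := by
  intro N
  induction N with
  | zero =>
    intro cs g hlen _ _
    have hnil : cs = [] := List.eq_nil_of_length_eq_zero (Nat.le_zero.1 hlen)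
    subst hnil
    rw [pvArec]
    simp [pvT]
  | succ N ih =>
    intro cs g hlen hpair hinv
    match cs with
    | [] =>
      rw [pvArec]; simp [pvT]
    | hd :: tl =>
      obtain ⟨hne, hsub⟩ := hinv hd (by simp)
      have hpairtl : List.Pairwise (fun a b => pvLexLE (pvMinCell a) (pvMinCell b)) tl :=
        (List.pairwise_cons.1 hpair).2
      have hlentl : tl.length ≤ N := by simpa using hlen
      by_cases hg : g = []
      · subst hg
        rw [pvArec]
        simp only [reduceIte]
        exact (pvT_nil (fun p hp => (hinv p hp).1)).symm
      · by_cases hmin : pvMinCell g = pvMinCell hd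
        · rw [pvArec]
          rw [if_neg hg, if_neg (by simpa using hmin), if_pos hsub]
          -- take branch + skip branch
          have hskip : pvArec g tl = pvT g tl :=
            ih tl g hlentl hpairtl (fun p hp => hinv p (by simp [hp]))
          have hfilt_sub : (tl.filter (fun t => decide (PySem.Set.inter hd t = []))).Sublist tl :=
            List.filter_sublist
          have htake : pvArec (PySem.Set.diff g hd)
              (tl.filter (fun t => decide (PySem.Set.inter hd t = []))) =
              pvT (PySem.Set.diff g hd)
              (tl.filter (fun t => decide (PySem.Set.inter hd t = []))) := by
            apply ih _ _ (le_trans (Nat.le_of_lt_succ (Nat.lt_succ_of_le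
              (hfilt_sub.length_le))) (by omega))
            · exact hpairtl.sublist hfilt_sub
            · intro p hp
              have hpt : p ∈ tl := hfilt_sub.mem hp
              have hdis : PySem.Set.inter hd p = [] := by
                have := List.of_mem_filter hp
                simpa using this
              obtain ⟨hpne, hpsub⟩ := hinv p (by simp [hpt])
              refine ⟨hpne, ?_⟩
              rw [pvSub_diff_iff]
              refine ⟨hpsub, fun a ha hahd => ?_⟩
              exact (pvInter_eq_nil_iff.1 hdis a hahd) ha
          have hdrop : pvT (PySem.Set.diff g hd)
              (tl.filter (fun t => decide (PySem.Set.inter hd t = []))) =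
              pvT (PySem.Set.diff g hd) tl := by
            apply pvT_filter
            intro p hp hPf hsubd
            have hint : PySem.Set.inter hd p ≠ [] := by
              intro hh
              simp [hh] at hPf
            obtain ⟨x, hx⟩ := List.exists_mem_of_ne_nil _ hint
            have hxhd : x ∈ hd := List.mem_of_mem_filter hx
            have hxp : x ∈ p := by
              have := List.of_mem_filter hx
              rwa [PySem.Set.contains_iff] at this
            have := (PySem.Set.issubset_iff _ _).1 hsubd x hxp
            rw [PySem.Set.mem_diff] at this
            exact this.2 hxhd
          rw [htake, hdrop, hskip]
          have : pvT g (hd :: tl) =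
              (if PySem.Set.issubset hd g = true then pvT (PySem.Set.diff g hd) tl else 0) +
                pvT g tl := rfl
          rw [this, if_pos hsub]
        · rw [pvArec]
          rw [if_neg hg, if_pos (by simpa using hmin)]
          have hc : pvMinCell g ∈ g := pvMinCell_mem hg
          refine (pvT_zero hc ?_).symm
          intro p hp hcp
          obtain ⟨hpne, hpsub⟩ := hinv p hp
          -- min g ≤ min hd ≤ min p ≤ min g forces min g = min hd
      
          have h1 : pvLexLE (pvMinCell g) (pvMinCell hd) :=
            pvMinCell_min hg ((PySem.Set.issubset_iff _ _).1 hsub _ (pvMinCell_mem hne))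
          have h2 : pvLexLE (pvMinCell hd) (pvMinCell p) := by
            rcases List.mem_cons.1 hp with h | h
            · subst h; exact pvLexLE_refl _
            · exact (List.pairwise_cons.1 hpair).1 p h
          have h3 : pvLexLE (pvMinCell p) (pvMinCell g) := pvMinCell_min hpne hcp
          exact hmin (pvLexLE_antisymm h1 (pvLexLE_trans h2 h3))

-- ----- proof layer: 4: cover lemma
lemma pvT_cover : ∀ (cs : List (PySem.Set (Int × Int))) (g : PySem.Set (Int × Int))
    (c : Int × Int), c ∈ g →
    pvT g cs = (cs.map (fun p =>
      if c ∈ p ∧ PySem.Set.issubset p g = true then pvT (PySem.Set.diff g p) cs else 0)).sum := by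
  intro cs
  induction cs with
  | nil =>
    intro g c hc
    have : g ≠ [] := fun hh => by subst hh; exact absurd hc (List.not_mem_nil)
    simp [pvT, this]
  | cons hd tl ih =>
    intro g c hc
    have hT : ∀ g', pvT g' (hd :: tl) =
        (if PySem.Set.issubset hd g' = true then pvT (PySem.Set.diff g' hd) tl else 0) +
          pvT g' tl := fun _ => rfl
    rw [List.map_cons, List.sum_cons, hT]
    by_cases hch : c ∈ hd
    · have hstep : ∀ p, c ∈ p →
          pvT (PySem.Set.diff g p) (hd :: tl) = pvT (PySem.Set.diff g p) tl := by
        intro p hcp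
        rw [hT]
        have hnot : ¬ PySem.Set.issubset hd (PySem.Set.diff g p) = true := by
          intro hh
          have := (PySem.Set.issubset_iff _ _).1 hh c hch
          rw [PySem.Set.mem_diff] at this
          exact this.2 hcp
        rw [if_neg hnot, zero_add]
      have hmap : (tl.map (fun p =>
          if c ∈ p ∧ PySem.Set.issubset p g = true then pvT (PySem.Set.diff g p) (hd :: tl) else 0)).sum
          = (tl.map (fun p =>
          if c ∈ p ∧ PySem.Set.issubset p g = true then pvT (PySem.Set.diff g p) tl else 0)).sum := by
        congr 1
        apply List.map_congr_left
        intro p _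
        by_cases hcnd : c ∈ p ∧ PySem.Set.issubset p g = true
        · rw [if_pos hcnd, if_pos hcnd, hstep p hcnd.1]
        · rw [if_neg hcnd, if_neg hcnd]
      rw [hmap, ← ih g c hc]
      by_cases hsub : PySem.Set.issubset hd g = true
      · rw [if_pos hsub,
            if_pos (show c ∈ hd ∧ PySem.Set.issubset hd g = true from ⟨hch, hsub⟩),
            hstep hd hch]
      · rw [if_neg hsub,
            if_neg (show ¬ (c ∈ hd ∧ PySem.Set.issubset hd g = true) from fun h => hsub h.2)]
    · rw [if_neg (show ¬ (c ∈ hd ∧ PySem.Set.issubset hd g = true) from fun h => hch h.1),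
          zero_add]
      have hsplit : (tl.map (fun p =>
          if c ∈ p ∧ PySem.Set.issubset p g = true then pvT (PySem.Set.diff g p) (hd :: tl) else 0)).sum
          = (tl.map (fun p =>
              if c ∈ p ∧ PySem.Set.issubset p g = true ∧
                  PySem.Set.issubset hd (PySem.Set.diff g p) = true then
                pvT (PySem.Set.diff (PySem.Set.diff g p) hd) tl else 0)).sum
            + (tl.map (fun p =>
              if c ∈ p ∧ PySem.Set.issubset p g = true then pvT (PySem.Set.diff g p) tl else 0)).sum := by
        rw [← PySem.List.sum_map_add_int]
        congr 1
        apply List.map_congr_left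
        intro p _
        by_cases hcnd : c ∈ p ∧ PySem.Set.issubset p g = true
        · rw [if_pos hcnd, hT]
          by_cases hh : PySem.Set.issubset hd (PySem.Set.diff g p) = true
          · rw [if_pos hh, if_pos ⟨hcnd.1, hcnd.2, hh⟩, if_pos hcnd]
          · rw [if_neg hh, if_neg (fun a => hh a.2.2), if_pos hcnd, zero_add]
        · rw [if_neg hcnd, if_neg (fun a => hcnd ⟨a.1, a.2.1⟩), if_neg hcnd, add_zero]
      rw [hsplit, ← ih g c hc]
      congr 1
      by_cases hsub : PySem.Set.issubset hd g = true
      · rw [if_pos hsub]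
        have hcd : c ∈ PySem.Set.diff g hd := (PySem.Set.mem_diff _ _ _).2 ⟨hc, hch⟩
        rw [ih (PySem.Set.diff g hd) c hcd]
        congr 1
        apply List.map_congr_left
        intro p _
        have hiff : (c ∈ p ∧ PySem.Set.issubset p (PySem.Set.diff g hd) = true) ↔
            (c ∈ p ∧ PySem.Set.issubset p g = true ∧
              PySem.Set.issubset hd (PySem.Set.diff g p) = true) := by
          constructor
          · intro ⟨h1, h2⟩
            rw [pvSub_diff_iff] at h2
            refine ⟨h1, h2.1, ?_⟩
            rw [pvSub_diff_iff]
            refine ⟨hsub, fun a ha hap => h2.2 a hap ha⟩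
          · intro ⟨h1, h2, h3⟩
            rw [pvSub_diff_iff] at h3
            refine ⟨h1, ?_⟩
            rw [pvSub_diff_iff]
            refine ⟨h2, fun a ha hahd => h3.2 a hahd ha⟩
        by_cases hcnd : c ∈ p ∧ PySem.Set.issubset p (PySem.Set.diff g hd) = true
        · rw [if_pos hcnd, if_pos (hiff.1 hcnd), pvDiff_comm]
        · rw [if_neg hcnd, if_neg (fun a => hcnd (hiff.2 a))]
      · rw [if_neg hsub]
        have : ∀ p ∈ tl, (if c ∈ p ∧ PySem.Set.issubset p g = true ∧
            PySem.Set.issubset hd (PySem.Set.diff g p) = true then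
              pvT (PySem.Set.diff (PySem.Set.diff g p) hd) tl else 0) = 0 := by
          intro p _
          rw [if_neg]
          intro ⟨_, _, h3⟩
          exact hsub (pvSub_diff_mono h3)
        rw [List.map_congr_left this]
        simp

-- ----- proof layer: 5: B side
def pvByMinOf (pieces : List (PySem.Set (Int × Int))) :
    PySem.Dict (Int × Int) (List (PySem.Set (Int × Int))) :=
  pieces.foldl (fun d p => PySem.Dict.modify d (pvMinCell p) [] (fun l => l ++ [p]))
    PySem.Dict.empty

lemma pvByMin_eq (n : Int) : pvByMin n = pvByMinOf (pvPiecesB n) := rfl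

lemma pvBucket_aux : ∀ (l : List (PySem.Set (Int × Int)))
    (d : PySem.Dict (Int × Int) (List (PySem.Set (Int × Int)))) (c : Int × Int),
    PySem.Dict.getD
      (l.foldl (fun d p => PySem.Dict.modify d (pvMinCell p) [] (fun ll => ll ++ [p])) d) c []
      = PySem.Dict.getD d c [] ++ l.filter (fun p => decide (pvMinCell p = c)) := by
  intro l
  induction l with
  | nil => intro d c; simp
  | cons p t ih =>
    intro d c
    rw [List.foldl_cons, ih, PySem.Dict.getD_modify]
    by_cases hk : c = pvMinCell p
    · subst hk
      rw [if_pos rfl, List.filter_cons_of_pos (by simp)]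
      simp
    · rw [if_neg hk, List.filter_cons_of_neg (by simp; exact fun hh => hk hh.symm)]

lemma pvBucket (pieces : List (PySem.Set (Int × Int))) (c : Int × Int) :
    PySem.Dict.getD (pvByMinOf pieces) c []
      = pieces.filter (fun p => decide (pvMinCell p = c)) := by
  rw [pvByMinOf, pvBucket_aux]
  rfl

lemma pvDiff_len_lt {g p : PySem.Set (Int × Int)}
    (hsub : PySem.Set.issubset p g = true) (hne : p ≠ []) :
    (PySem.Set.diff g p).length < g.length := by
  obtain ⟨x, hx⟩ := List.exists_mem_of_ne_nil p hne
  have hxg : x ∈ g := (PySem.Set.issubset_iff _ _).1 hsub x hx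
  exact List.length_filter_lt_length_iff_exists.2 ⟨x, hxg, by
    simpa [PySem.Set.contains] using hx⟩

lemma pvSum_filter {α : Type} (l : List α) (Q : α → Bool) (F : α → Int) :
    ((l.filter Q).map F).sum = (l.map (fun x => if Q x = true then F x else 0)).sum := by
  induction l with
  | nil => rfl
  | cons a t ih =>
    by_cases hQ : Q a = true
    · rw [List.filter_cons_of_pos hQ, List.map_cons, List.sum_cons, List.map_cons, List.sum_cons,
          if_pos hQ, ih]
    · rw [List.filter_cons_of_neg (by simp [hQ]), List.map_cons, List.sum_cons, if_neg hQ,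
          zero_add, ih]

lemma pvBrec_eq_pvT_aux : ∀ (N : Nat) (pieces : List (PySem.Set (Int × Int)))
    (g : PySem.Set (Int × Int)), g.length ≤ N → (∀ p ∈ pieces, p ≠ []) →
    pvBrec (pvByMinOf pieces) g (PySem.Dict.getD (pvByMinOf pieces) (pvMinCell g) []) =
      pvT g pieces := by
  intro N
  induction N with
  | zero =>
    intro pieces g hlen hne
    have hg : g = [] := List.eq_nil_of_length_eq_zero (Nat.le_zero.1 hlen)
    subst hg
    rw [pvBrec.eq_def]
    simp only [reduceIte]
    exact (pvT_nil hne).symm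
  | succ N ih =>
    intro pieces g hlen hne
    by_cases hg : g = []
    · subst hg
      rw [pvBrec.eq_def]
      simp only [reduceIte]
      exact (pvT_nil hne).symm
    · have hloop : ∀ rem, (∀ p ∈ rem, p ∈ pieces) →
          pvBrec (pvByMinOf pieces) g rem =
          (rem.map (fun p => if PySem.Set.issubset p g = true ∧ p ≠ [] then
            pvT (PySem.Set.diff g p) pieces else 0)).sum := by
        intro rem
        induction rem with
        | nil => intro _; rw [pvBrec.eq_def]; simp [hg]
        | cons p tpl ihr =>
          intro hmem
          rw [pvBrec.eq_def, if_neg hg]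
          simp only []
          by_cases hcnd : PySem.Set.issubset p g = true ∧ p ≠ []
          · rw [dif_pos hcnd]
            have hlt : (PySem.Set.diff g p).length < g.length := pvDiff_len_lt hcnd.1 hcnd.2
            rw [ih pieces (PySem.Set.diff g p) (by omega) hne,
                ihr (fun q hq => hmem q (by simp [hq])), List.map_cons, List.sum_cons,
                if_pos hcnd]
          · rw [dif_neg hcnd]
            rw [ihr (fun q hq => hmem q (by simp [hq])), List.map_cons, List.sum_cons,
                if_neg hcnd, zero_add]
      rw [pvBucket]
      rw [hloop _ (fun p hp => List.mem_of_mem_filter hp)]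
      rw [pvSum_filter]
      rw [pvT_cover pieces g (pvMinCell g) (pvMinCell_mem hg)]
      congr 1
      apply List.map_congr_left
      intro p hp
      have hpne : p ≠ [] := hne p hp
      by_cases hcnd : pvMinCell g ∈ p ∧ PySem.Set.issubset p g = true
      · have hminp : pvMinCell p = pvMinCell g := by
          apply pvLexLE_antisymm
          · exact pvMinCell_min hpne hcnd.1
          · exact pvMinCell_min hg ((PySem.Set.issubset_iff _ _).1 hcnd.2 _ (pvMinCell_mem hpne))
        rw [if_pos (by simp [hminp]), if_pos ⟨hcnd.2, hpne⟩, if_pos hcnd]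
      · rw [if_neg hcnd]
        by_cases hmin : pvMinCell p = pvMinCell g
        · rw [if_pos (by simp [hmin])]
          have : ¬ (PySem.Set.issubset p g = true ∧ p ≠ []) := by
            intro ⟨h1, _⟩
            exact hcnd ⟨hmin ▸ pvMinCell_mem hpne, h1⟩
          rw [if_neg this]
        · rw [if_neg (by simp [hmin])]

lemma pvBrec_eq_pvT (pieces : List (PySem.Set (Int × Int)))
    (hne : ∀ p ∈ pieces, p ≠ []) (g : PySem.Set (Int × Int)) :
    pvBrec (pvByMinOf pieces) g (PySem.Dict.getD (pvByMinOf pieces) (pvMinCell g) []) =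
      pvT g pieces :=
  pvBrec_eq_pvT_aux g.length pieces g (Nat.le_refl _) hne

-- ----- proof layer: 6: sortedness of A's candidate list
lemma pvPairwise_insertBy {α : Type} (before : α → α → Bool) (R : α → α → Prop)
    (hRof : ∀ a b, before b a = false → R a b)
    (hasym : ∀ a b, before a b = true → before b a = false)
    (htrans : ∀ a b c, before a b = true → before c b = false → before c a = false)
    (hRev : ∀ a b, R a b → before b a = false)
    (x : α) : ∀ (l : List α), l.Pairwise R → (PySem.List.insertBy before x l).Pairwise R := by
  intro l
  induction l with
  | nil => intro _; simp [PySem.List.insertBy]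
  | cons y ys ih =>
    intro h
    obtain ⟨hy, hys⟩ := List.pairwise_cons.1 h
    have hstep : PySem.List.insertBy before x (y :: ys) =
        if before x y = true then x :: y :: ys else y :: PySem.List.insertBy before x ys := rfl
    rw [hstep]
    by_cases hxy : before x y = true
    · rw [if_pos hxy]
      refine List.pairwise_cons.2 ⟨?_, h⟩
      intro z hz
      rcases List.mem_cons.1 hz with h1 | h1
      · subst h1; exact hRof x z (hasym x z hxy)
      · exact hRof x z (htrans x y z hxy (hRev y z (hy z h1)))
    · rw [if_neg hxy]
      refine List.pairwise_cons.2 ⟨?_, ih hys⟩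
      intro z hz
      rcases (PySem.List.mem_insertBy before x z ys).1 hz with h1 | h1
      · subst h1
        exact hRof y z (by simpa using hxy)
      · exact hy z h1

lemma pvSorted2_pairwise (xs : List (PySem.Set (Int × Int))) :
    (PySem.List.sorted2 xs (fun p => (pvMinCell p).1) (fun p => (pvMinCell p).2) false).Pairwise
      (fun a b => pvLexLE (pvMinCell a) (pvMinCell b)) := by
  have hbody : PySem.List.sorted2 xs (fun p => (pvMinCell p).1) (fun p => (pvMinCell p).2) false =
      xs.foldl (fun acc x => PySem.List.insertBy
        (fun a b => decide ((pvMinCell a).1 < (pvMinCell b).1) ||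
          !decide ((pvMinCell b).1 < (pvMinCell a).1) && decide ((pvMinCell a).2 < (pvMinCell b).2))
        x acc) [] := rfl
  rw [hbody]
  set before := fun (a b : PySem.Set (Int × Int)) =>
    decide ((pvMinCell a).1 < (pvMinCell b).1) ||
      !decide ((pvMinCell b).1 < (pvMinCell a).1) && decide ((pvMinCell a).2 < (pvMinCell b).2)
    with hbef
  have hchar : ∀ a b, before a b = true ↔
      ((pvMinCell a).1 < (pvMinCell b).1 ∨
        ((pvMinCell b).1 ≥ (pvMinCell a).1 ∧ (pvMinCell a).2 < (pvMinCell b).2)) := by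
    intro a b
    rw [hbef]
    simp only [Bool.or_eq_true, Bool.and_eq_true, Bool.not_eq_true', decide_eq_true_eq,
      decide_eq_false_iff_not]
    omega
  have hcharf : ∀ a b, before a b = false ↔
      ¬ ((pvMinCell a).1 < (pvMinCell b).1 ∨
        ((pvMinCell b).1 ≥ (pvMinCell a).1 ∧ (pvMinCell a).2 < (pvMinCell b).2)) := by
    intro a b
    rw [← hchar]
    simp
  have main : ∀ (l : List (PySem.Set (Int × Int))) (acc : List (PySem.Set (Int × Int))),
      acc.Pairwise (fun a b => pvLexLE (pvMinCell a) (pvMinCell b)) →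
      (l.foldl (fun acc x => PySem.List.insertBy before x acc) acc).Pairwise
        (fun a b => pvLexLE (pvMinCell a) (pvMinCell b)) := by
    intro l
    induction l with
    | nil => intro acc h; exact h
    | cons x t ih =>
      intro acc h
      rw [List.foldl_cons]
      apply ih
      apply pvPairwise_insertBy before _ _ _ _ _ x acc h
      · intro a b hf
        rw [hcharf] at hf
        unfold pvLexLE
        omega
      · intro a b ht
        rw [hchar] at ht
        rw [hcharf]
        omega
      · intro a b c ht hf
        rw [hchar] at ht
        rw [hcharf] at hf ⊢
        omega
      · intro a b hR
        rw [hcharf]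
        unfold pvLexLE at hR
        omega
  exact main xs [] (List.Pairwise.nil)

-- ----- proof layer: 7: Forall₂ plumbing and piece-list facts
lemma pvF2_append {α β : Type} {R : α → β → Prop} :
    ∀ {l1 l2 : List α} {l1' l2' : List β}, List.Forall₂ R l1 l1' → List.Forall₂ R l2 l2' →
    List.Forall₂ R (l1 ++ l2) (l1' ++ l2') := by
  intro l1 l2 l1' l2' h1 h2
  induction h1 with
  | nil => exact h2
  | cons h t ih => exact List.forall₂_cons.2 ⟨h, ih⟩

lemma pvF2_flatMap2 {α α' β : Type} {R' : α → α' → Prop} {R : β → β → Prop}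
    {F : α → List β} {G : α' → List β} :
    ∀ {l : List α} {l' : List α'}, List.Forall₂ R' l l' →
    (∀ a b, R' a b → List.Forall₂ R (F a) (G b)) →
    List.Forall₂ R (l.flatMap F) (l'.flatMap G) := by
  intro l l' h hFG
  induction h with
  | nil => exact List.Forall₂.nil
  | cons h t ih => exact pvF2_append (hFG _ _ h) ih

lemma pvF2_map {α β : Type} {R : β → β → Prop} {F G : α → β} :
    ∀ {l : List α}, (∀ x ∈ l, R (F x) (G x)) → List.Forall₂ R (l.map F) (l.map G) := by
  intro l
  induction l with
  | nil => intro _; exact List.Forall₂.nil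
  | cons a t ih =>
    intro h
    exact List.forall₂_cons.2 ⟨h a (by simp), ih (fun x hx => h x (by simp [hx]))⟩

lemma pvF2_flatMap {α β : Type} {R : β → β → Prop} {F G : α → List β} :
    ∀ {l : List α}, (∀ x ∈ l, List.Forall₂ R (F x) (G x)) →
    List.Forall₂ R (l.flatMap F) (l.flatMap G) := by
  intro l
  induction l with
  | nil => intro _; exact List.Forall₂.nil
  | cons a t ih =>
    intro h
    exact pvF2_append (h a (by simp)) (ih (fun x hx => h x (by simp [hx])))

lemma pvF2_mem_right {α β : Type} {R : α → β → Prop} :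
    ∀ {l : List α} {l' : List β}, List.Forall₂ R l l' → ∀ b ∈ l', ∃ a ∈ l, R a b := by
  intro l l' h
  induction h with
  | nil => intro b hb; exact absurd hb (List.not_mem_nil)
  | cons h t ih =>
    intro b hb
    rcases List.mem_cons.1 hb with h1 | h1
    · subst h1; exact ⟨_, by simp, h⟩
    · obtain ⟨a, ha, hR⟩ := ih b h1
      exact ⟨a, by simp [ha], hR⟩

lemma pvF2_filter {g : PySem.Set (Int × Int)} :
    ∀ {l l' : List (PySem.Set (Int × Int))}, List.Forall₂ pvMemEq l l' →
    List.Forall₂ pvMemEq (l.filter (fun p => PySem.Set.issubset p g))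
      (l'.filter (fun p => PySem.Set.issubset p g)) := by
  intro l l' h
  induction h with
  | nil => exact List.Forall₂.nil
  | cons h t ih =>
    rename_i a b l1 l2
    have hco := pvSub_congr_left (g := g) h
    simp only [List.filter_cons, ← hco]
    by_cases hs : PySem.Set.issubset a g = true
    · simp only [hs, if_true]
      exact List.forall₂_cons.2 ⟨h, ih⟩
    · have hsf : PySem.Set.issubset a g = false := by
        cases hq : PySem.Set.issubset a g
        · rfl
        · exact absurd hq hs
      simp only [hsf, Bool.false_eq_true, if_false]
      exact ih

lemma pvFlatMap_if {α β : Type} (f : α → β) (Q : β → Bool) :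
    ∀ (l : List α), (l.flatMap fun x => if Q (f x) = true then [f x] else []) = (l.map f).filter Q := by
  intro l
  induction l with
  | nil => rfl
  | cons a t ih =>
    rw [List.flatMap_cons, List.map_cons, ih]
    by_cases hQ : Q (f a) = true
    · rw [if_pos hQ, List.filter_cons_of_pos hQ]
      rfl
    · rw [if_neg hQ, List.filter_cons_of_neg (by simpa using hQ), List.nil_append]

lemma pvMem_ofList_map {l : List (Int × Int)} {f : Int × Int → Int × Int} {z : Int × Int} :
    z ∈ PySem.Set.ofList (l.map f) ↔ ∃ w ∈ l, z = f w := by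
  rw [PySem.Set.mem_ofList, List.mem_map]
  constructor
  · intro ⟨w, hw, he⟩; exact ⟨w, hw, he.symm⟩
  · intro ⟨w, hw, he⟩; exact ⟨w, hw, he.symm⟩

lemma pvMem_tri {s : Int} {z : Int × Int} :
    z ∈ pvTriList s ↔ 0 ≤ z.1 ∧ z.1 < s ∧ 0 ≤ z.2 ∧ z.2 < s ∧ z.1 ≤ z.2 := by
  unfold pvTriList
  simp only [List.mem_flatMap, List.mem_filterMap, PySem.List.mem_pyRange_one]
  constructor
  · intro ⟨x, hx, y, hy, he⟩
    by_cases hxy : x ≤ y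
    · rw [if_pos hxy, Option.some.injEq] at he
      subst he
      simp only []
      omega
    · rw [if_neg hxy] at he
      simp at he
  · intro h
    refine ⟨z.1, by omega, z.2, by omega, ?_⟩
    rw [if_pos (by omega)]

lemma pvMem_cells {s : Int} {z : Int × Int} :
    z ∈ pvCellsB s ↔ 0 ≤ z.1 ∧ z.1 < s ∧ 0 ≤ z.2 ∧ z.2 < s := by
  unfold pvCellsB
  simp only [List.mem_flatMap, List.mem_map, PySem.List.mem_pyRange_one]
  constructor
  · intro ⟨x, hx, y, hy, he⟩
    subst he
    simp only []
    omega
  · intro h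
    exact ⟨z.1, by omega, z.2, by omega, rfl⟩

-- ----- proof layer: 8: the two piece lists agree as sets
def pvBasesA (s : Int) : List (PySem.Set (Int × Int)) :=
  let b0 : PySem.Set (Int × Int) := PySem.Set.ofList (pvTriList s)
  let b1 : PySem.Set (Int × Int) := PySem.Set.ofList (b0.map (fun c => (c.1, s - 1 - c.2)))
  let b2 : PySem.Set (Int × Int) := PySem.Set.ofList (b0.map (fun c => (s - 1 - c.1, c.2)))
  let b3 : PySem.Set (Int × Int) := PySem.Set.ofList (b0.map (fun c => (s - 1 - c.1, s - 1 - c.2)))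
  if s = 1 then [b0] else [b0, b1, b2, b3]

def pvBlockA (n s : Int) : List (PySem.Set (Int × Int)) :=
  (pvBasesA s).flatMap (fun b =>
    (PySem.List.pyRange 0 n 1).flatMap (fun ox =>
      (PySem.List.pyRange 0 n 1).map (fun oy =>
        PySem.Set.ofList (b.map (fun c => (c.1 + ox, c.2 + oy))))))

lemma pvPiecesRawA_eq (n : Int) :
    pvPiecesRawA n = (PySem.List.pyRange 1 (n + 1) 1).flatMap (pvBlockA n) := by
  have h : pvPiecesRawA n =
      (PySem.List.pyRange 1 (n + 1) 1).foldl (fun acc s => acc ++ pvBlockA n s) [] := rfl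
  rw [h, PySem.List.foldl_append_eq_flatMap]
  rfl

def pvBlockRawB (n s : Int) : List (PySem.Set (Int × Int)) :=
  (pvShapesB s).flatMap (fun sh =>
    (PySem.List.pyRange 0 n 1).flatMap (fun ox =>
      (PySem.List.pyRange 0 n 1).map (fun oy =>
        PySem.Set.ofList (sh.map (fun c => (c.1 + ox, c.2 + oy))))))

lemma pvPiecesB_eq (n : Int) :
    pvPiecesB n = ((PySem.List.pyRange 1 (n + 1) 1).flatMap (pvBlockRawB n)).filter
      (fun p => PySem.Set.issubset p (pvCoords n)) := by
  have h : pvPiecesB n =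
      (PySem.List.pyRange 1 (n + 1) 1).foldl (fun acc s => acc ++
        ((pvShapesB s).flatMap (fun sh =>
          (PySem.List.pyRange 0 n 1).flatMap (fun ox =>
            (PySem.List.pyRange 0 n 1).flatMap (fun oy =>
              if PySem.Set.issubset
                  (PySem.Set.ofList (sh.map (fun c => (c.1 + ox, c.2 + oy)))) (pvCoords n) = true
              then [PySem.Set.ofList (sh.map (fun c => (c.1 + ox, c.2 + oy)))] else []))))) [] := rfl
  rw [h, PySem.List.foldl_append_eq_flatMap]
  rw [List.nil_append, List.filter_flatMap]
  apply List.flatMap_congr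
  intro s _
  unfold pvBlockRawB
  rw [List.filter_flatMap]
  apply List.flatMap_congr
  intro sh _
  rw [List.filter_flatMap]
  apply List.flatMap_congr
  intro ox _
  exact pvFlatMap_if (fun oy => PySem.Set.ofList (sh.map (fun c => (c.1 + ox, c.2 + oy))))
    (fun p => PySem.Set.issubset p (pvCoords n)) _

lemma pvMem_b0 {s : Int} {z : Int × Int} :
    z ∈ PySem.Set.ofList (pvTriList s) ↔
      0 ≤ z.1 ∧ z.1 < s ∧ 0 ≤ z.2 ∧ z.2 < s ∧ z.1 ≤ z.2 := by
  rw [PySem.Set.mem_ofList, pvMem_tri]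

lemma pvME0 (s : Int) : pvMemEq (PySem.Set.ofList (pvTriList s))
    (PySem.Set.ofList ((pvCellsB s).filter (fun c => decide (c.1 ≤ c.2)))) := by
  intro z
  rw [pvMem_b0, PySem.Set.mem_ofList, List.mem_filter, pvMem_cells, decide_eq_true_eq]
  omega

lemma pvME1 (s : Int) : pvMemEq
    (PySem.Set.ofList ((PySem.Set.ofList (pvTriList s)).map (fun c => (c.1, s - 1 - c.2))))
    (PySem.Set.ofList ((pvCellsB s).filter (fun c => decide (c.1 + c.2 ≤ s - 1)))) := by
  intro z
  rw [pvMem_ofList_map, PySem.Set.mem_ofList, List.mem_filter, pvMem_cells, decide_eq_true_eq]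
  constructor
  · intro ⟨w, hw, he⟩
    rw [pvMem_b0] at hw
    subst he
    simp only []
    omega
  · intro h
    refine ⟨(z.1, s - 1 - z.2), ?_, ?_⟩
    · rw [pvMem_b0]; simp only []; omega
    · apply Prod.ext <;> simp only [] <;> omega

lemma pvME2 (s : Int) : pvMemEq
    (PySem.Set.ofList ((PySem.Set.ofList (pvTriList s)).map (fun c => (s - 1 - c.1, c.2))))
    (PySem.Set.ofList ((pvCellsB s).filter (fun c => decide (s - 1 ≤ c.1 + c.2)))) := by
  intro z
  rw [pvMem_ofList_map, PySem.Set.mem_ofList, List.mem_filter, pvMem_cells, decide_eq_true_eq]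
  constructor
  · intro ⟨w, hw, he⟩
    rw [pvMem_b0] at hw
    subst he
    simp only []
    omega
  · intro h
    refine ⟨(s - 1 - z.1, z.2), ?_, ?_⟩
    · rw [pvMem_b0]; simp only []; omega
    · apply Prod.ext <;> simp only [] <;> omega

lemma pvME3 (s : Int) : pvMemEq
    (PySem.Set.ofList ((PySem.Set.ofList (pvTriList s)).map (fun c => (s - 1 - c.1, s - 1 - c.2))))
    (PySem.Set.ofList ((pvCellsB s).filter (fun c => decide (c.2 ≤ c.1)))) := by
  intro z
  rw [pvMem_ofList_map, PySem.Set.mem_ofList, List.mem_filter, pvMem_cells, decide_eq_true_eq]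
  constructor
  · intro ⟨w, hw, he⟩
    rw [pvMem_b0] at hw
    subst he
    simp only []
    omega
  · intro h
    refine ⟨(s - 1 - z.1, s - 1 - z.2), ?_, ?_⟩
    · rw [pvMem_b0]; simp only []; omega
    · apply Prod.ext <;> simp only [] <;> omega

lemma pvF2_bases (s : Int) (hs : 1 ≤ s) :
    List.Forall₂ pvMemEq (pvBasesA s) (pvShapesB s) := by
  unfold pvBasesA pvShapesB
  by_cases h1 : s = 1
  · subst h1
    simp only [reduceIte]
    exact List.forall₂_cons.2 ⟨pvME0 1, List.Forall₂.nil⟩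
  · have hgt : s > 1 := by omega
    simp only [if_neg h1, if_pos hgt]
    exact List.forall₂_cons.2 ⟨pvME0 s, List.forall₂_cons.2 ⟨pvME1 s,
      List.forall₂_cons.2 ⟨pvME2 s, List.forall₂_cons.2 ⟨pvME3 s, List.Forall₂.nil⟩⟩⟩⟩

lemma pvME_trans {b sh : PySem.Set (Int × Int)} (h : pvMemEq b sh) (ox oy : Int) :
    pvMemEq (PySem.Set.ofList (b.map (fun c => (c.1 + ox, c.2 + oy))))
      (PySem.Set.ofList (sh.map (fun c => (c.1 + ox, c.2 + oy)))) := by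
  intro z
  rw [pvMem_ofList_map, pvMem_ofList_map]
  constructor
  · intro ⟨w, hw, he⟩; exact ⟨w, (h w).1 hw, he⟩
  · intro ⟨w, hw, he⟩; exact ⟨w, (h w).2 hw, he⟩

lemma pvF2_block (n s : Int) (hs : 1 ≤ s) :
    List.Forall₂ pvMemEq (pvBlockA n s) (pvBlockRawB n s) := by
  unfold pvBlockA pvBlockRawB
  refine pvF2_flatMap2 (pvF2_bases s hs) ?_
  intro b sh h
  refine pvF2_flatMap ?_
  intro ox _
  exact pvF2_map (fun oy _ => pvME_trans h ox oy)

lemma pvF2_pieces (n : Int) :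
    List.Forall₂ pvMemEq
      ((pvPiecesRawA n).filter (fun p => PySem.Set.issubset p (pvCoords n)))
      (pvPiecesB n) := by
  rw [pvPiecesRawA_eq, pvPiecesB_eq]
  refine pvF2_filter (pvF2_flatMap ?_)
  intro s hs
  rw [PySem.List.mem_pyRange_one] at hs
  exact pvF2_block n s hs.1

lemma pvBases_ne {s : Int} (hs : 1 ≤ s) : ∀ b ∈ pvBasesA s, b ≠ [] := by
  have h0 : ((0 : Int), (0 : Int)) ∈ PySem.Set.ofList (pvTriList s) := by
    rw [pvMem_b0]; simp only []; omega
  have hb0 : PySem.Set.ofList (pvTriList s) ≠ [] := List.ne_nil_of_mem h0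
  have hmapped : ∀ f : Int × Int → Int × Int,
      PySem.Set.ofList ((PySem.Set.ofList (pvTriList s)).map f) ≠ [] := by
    intro f
    exact List.ne_nil_of_mem (pvMem_ofList_map.2 ⟨(0, 0), h0, rfl⟩)
  intro b hb
  unfold pvBasesA at hb
  by_cases h1 : s = 1
  · subst h1
    simp only [reduceIte] at hb
    rcases List.mem_cons.1 hb with h | h
    · subst h; exact hb0
    · exact absurd h (List.not_mem_nil)
  · simp only [if_neg h1, List.mem_cons, List.not_mem_nil, or_false] at hb
    rcases hb with h | h | h | h
    · subst h; exact hb0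
    · subst h; exact hmapped _
    · subst h; exact hmapped _
    · subst h; exact hmapped _

lemma pvRawA_ne (n : Int) : ∀ p ∈ pvPiecesRawA n, p ≠ [] := by
  intro p hp
  rw [pvPiecesRawA_eq] at hp
  rw [List.mem_flatMap] at hp
  obtain ⟨s, hs, hp⟩ := hp
  rw [PySem.List.mem_pyRange_one] at hs
  unfold pvBlockA at hp
  rw [List.mem_flatMap] at hp
  obtain ⟨b, hb, hp⟩ := hp
  rw [List.mem_flatMap] at hp
  obtain ⟨ox, _, hp⟩ := hp
  rw [List.mem_map] at hp
  obtain ⟨oy, _, hp⟩ := hp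
  subst hp
  obtain ⟨x, hx⟩ := List.exists_mem_of_ne_nil b (pvBases_ne hs.1 b hb)
  exact List.ne_nil_of_mem (pvMem_ofList_map.2 ⟨x, hx, rfl⟩)

-- ----- proof layer: 9: assembly
lemma pvPiecesA_perm (n : Int) :
    (pvPiecesA n).Perm ((pvPiecesRawA n).filter (fun p => PySem.Set.issubset p (pvCoords n))) := by
  unfold pvPiecesA
  exact PySem.List.sorted2_perm _ _ _ _

lemma pvFilt_facts (n : Int) :
    ∀ p ∈ (pvPiecesRawA n).filter (fun p => PySem.Set.issubset p (pvCoords n)),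
      p ≠ [] ∧ PySem.Set.issubset p (pvCoords n) = true :=
  fun p hp => ⟨pvRawA_ne n p (List.mem_of_mem_filter hp), List.of_mem_filter (p := fun p => PySem.Set.issubset p (pvCoords n)) hp⟩

lemma pvB_ne (n : Int) : ∀ p ∈ pvPiecesB n, p ≠ [] := by
  intro q hq
  obtain ⟨p, hp, hR⟩ := pvF2_mem_right (pvF2_pieces n) q hq
  obtain ⟨x, hx⟩ := List.exists_mem_of_ne_nil p (pvFilt_facts n p hp).1
  exact List.ne_nil_of_mem ((hR x).1 hx)

theorem pv_main (n : Int) : f n = f_alt n := by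
  have hA : f n = pvT (pvCoords n) (pvPiecesA n) := by
    apply pvArec_eq_pvT_aux (pvPiecesA n).length _ _ (Nat.le_refl _)
    · unfold pvPiecesA
      exact pvSorted2_pairwise _
    · intro p hp
      exact pvFilt_facts n p ((pvPiecesA_perm n).mem_iff.1 hp)
  have hperm : pvT (pvCoords n) (pvPiecesA n) =
      pvT (pvCoords n) ((pvPiecesRawA n).filter (fun p => PySem.Set.issubset p (pvCoords n))) :=
    pvT_perm (pvPiecesA_perm n) _
  have hcongr := pvT_congr (pvF2_pieces n) (pvCoords n)
  have hB : f_alt n = pvT (pvCoords n) (pvPiecesB n) := by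
    show pvBrec (pvByMin n) (pvCoords n)
      (PySem.Dict.getD (pvByMin n) (pvMinCell (pvCoords n)) []) = _
    rw [pvByMin_eq]
    exact pvBrec_eq_pvT _ (pvB_ne n) _
  rw [hA, hperm, hcongr, hB]

-- ===== VERDICT (by name: the statement is the Claim_ definition above) =====
theorem f_spec : Claim_equal_f := fun n _ => pv_main n
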